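-- pv_equiv track=rewrite | github.com/Oiloutlaw/Autonomous-Agent | main.py | break_script_into_scenes
-- ===== SOURCE A (Python) =====
-- def break_script_into_scenes(script):
--     """Break script into individual scenes"""
--     scenes = []
--     lines = script.split('\n')
--     current_scene = ""
--
--     for line in lines:
--         if line.strip():
--             if any(keyword in line.lower() for keyword in ['scene', 'timestamp', '0:', '1:', '2:']):
--                 if current_scene:
--                     scenes.append(current_scene.strip())
--                 current_scene = line
--             else:
--                 current_scene += " " + line
--
--     if current_scene:
--         scenes.append(current_scene.strip())
--
--     return scenes[:5]
-- ===== SOURCE B (Python) =====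
-- def break_script_into_scenes(script):
--     """Break script into individual scenes"""
--     keywords = ['scene', 'timestamp', '0:', '1:', '2:']
--
--     def is_kw(line):
--         lo = line.lower()
--         return any(k in lo for k in keywords)
--
--     def split_first(ls):
--         # ls is non-empty: the first scene runs up to (excluding) the next
--         # keyword line after position 0
--         cut = 1
--         while cut < len(ls) and not is_kw(ls[cut]):
--             cut += 1
--         return ls[:cut], ls[cut:]
--
--     def split_scenes(ls, budget):
--         # recursively peel off the leading scene, at most `budget` of them
--         if not ls or budget == 0:
--             return []
--         seg, rest = split_first(ls)
--         return [' '.join(seg).strip()] + split_scenes(rest, budget - 1)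
--
--     lines = [l for l in script.split('\n') if l.strip()]
--     return split_scenes(lines, 5)
-- ===== Notes on version B (the rewrite author's own statement) =====
-- stated objective: alternative
-- what changed: B replaces A's single accumulator loop (growing a current-scene string, flushing it at keyword lines) with a staged, recursive decomposition: filter the non-blank lines once, then recursively peel off the leading scene by scanning forward for the next keyword line (split_first), joining each peeled segment, with a budget of 5 so only the first five scenes are built.
import Mathlib
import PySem

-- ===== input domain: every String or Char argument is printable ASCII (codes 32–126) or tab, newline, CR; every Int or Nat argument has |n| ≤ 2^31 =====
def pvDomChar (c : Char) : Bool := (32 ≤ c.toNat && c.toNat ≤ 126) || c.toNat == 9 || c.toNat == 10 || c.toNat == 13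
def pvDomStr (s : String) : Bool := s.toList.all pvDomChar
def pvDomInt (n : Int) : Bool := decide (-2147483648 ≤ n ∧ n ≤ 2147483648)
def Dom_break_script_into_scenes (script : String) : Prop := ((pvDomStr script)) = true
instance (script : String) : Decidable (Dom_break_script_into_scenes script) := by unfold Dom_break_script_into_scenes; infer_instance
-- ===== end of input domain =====

-- B replaces A's accumulator loop with recursive scene-peeling: filter the
-- non-blank lines once, then repeatedly split off the leading segment at the
-- next keyword line (at most 5 times); objective: alternative (same cost).

-- ===== PORT A =====
-- any(keyword in line.lower() for keyword in ['scene','timestamp','0:','1:','2:'])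
def pvKwA (line : List Char) : Bool :=
  ["scene".toList, "timestamp".toList, "0:".toList, "1:".toList, "2:".toList].any
    (fun kw => PySem.Chars.isIn kw (PySem.Chars.lower line))

-- the body of A's for-loop, state = (scenes, current_scene)
def pvStepA (st : List (List Char) × List Char) (line : List Char) :
    List (List Char) × List Char :=
  if PySem.Chars.strip line ≠ [] then
    if pvKwA line then
      (if st.2 ≠ [] then st.1 ++ [PySem.Chars.strip st.2] else st.1, line)
    else
      (st.1, st.2 ++ ' ' :: line)
  else st

def break_script_into_scenes (script : String) : List String :=
  let lines := PySem.Chars.splitOn script.toList "\n".toList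
  let st := lines.foldl pvStepA ([], [])
  let scenes := if st.2 ≠ [] then st.1 ++ [PySem.Chars.strip st.2] else st.1
  (PySem.List.slice scenes none (some 5)).map String.ofList

-- ===== PORT B =====
-- is_kw(line): any(k in line.lower() for k in keywords)
def pvKwB (lo : List Char) : Bool :=
  ["scene".toList, "timestamp".toList, "0:".toList, "1:".toList, "2:".toList].any
    (fun k => PySem.Chars.isIn k lo)

-- the inner while-loop of split_first: scan ls[1:] up to the next keyword line,
-- returning (the lines scanned past, the remainder from the keyword line on)
def pvScan : List (List Char) → List (List Char) × List (List Char)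
  | [] => ([], [])
  | l :: rest =>
    if pvKwB (PySem.Chars.lower l) then ([], l :: rest)
    else
      let s := pvScan rest
      (l :: s.1, s.2)

-- split_scenes(ls, budget): peel off the leading segment, recurse on the rest
def pvSplitScenes : Nat → List (List Char) → List (List Char)
  | _, [] => []
  | 0, _ :: _ => []
  | n + 1, l :: tail =>
    let s := pvScan tail
    PySem.Chars.strip (PySem.Chars.join [' '] (l :: s.1)) :: pvSplitScenes n s.2

def break_script_into_scenes_alt (script : String) : List String :=
  let lines := (PySem.Chars.splitOn script.toList "\n".toList).filter
    (fun l => !(PySem.Chars.strip l).isEmpty)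
  (pvSplitScenes 5 lines).map String.ofList

-- ===== PRECONDITION & SPEC =====
def Spec_break_script_into_scenes (script : String) (out : List String) : Prop := out = break_script_into_scenes_alt script
instance (script : String) (out : List String) : Decidable (Spec_break_script_into_scenes script out) := by unfold Spec_break_script_into_scenes; infer_instance

-- ===== CLAIM (what is proved, stated in full; the proofs are below) =====
def Claim_equal_break_script_into_scenes : Prop := ∀ (script : String), Dom_break_script_into_scenes script → Spec_break_script_into_scenes script (break_script_into_scenes script)

-- ===== LEMMAS AND PROOFS =====

def pvJ (g : List (List Char)) : List Char := PySem.Chars.join [' '] g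

def pvScene (g : List (List Char)) : List Char := PySem.Chars.strip (pvJ g)

-- proof-side intermediate: A's loop re-expressed as grouping the lines
def pvStepG (st : List (List (List Char)) × List (List Char)) (line : List Char) :
    List (List (List Char)) × List (List Char) :=
  if PySem.Chars.strip line = [] then st
  else if !st.2.isEmpty && pvKwB (PySem.Chars.lower line) then
    (st.1 ++ [st.2], [line])
  else
    (st.1, st.2 ++ [line])

def pvFinalize (st : List (List (List Char)) × List (List Char)) :
    List (List (List Char)) :=
  if st.2.isEmpty then st.1 else st.1 ++ [st.2]

-- grouping by recursive scene-peeling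
def pvChunksAux : List (List Char) → List (List Char) → List (List (List Char))
  | cur, [] => [cur]
  | cur, l :: rest =>
    if pvKwB (PySem.Chars.lower l) then cur :: pvChunksAux [l] rest
    else pvChunksAux (cur ++ [l]) rest

def pvChunks : List (List Char) → List (List (List Char))
  | [] => []
  | l :: rest => pvChunksAux [l] rest

-- the relation between A's loop state and the grouping loop state
def pvInv (a : List (List Char) × List Char)
    (b : List (List (List Char)) × List (List Char)) : Prop :=
  a.1 = b.1.map pvScene ∧
  (a.2 = pvJ b.2 ∨ a.2 = ' ' :: pvJ b.2) ∧
  (a.2 = [] ↔ b.2 = [])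

lemma pvStrip_cons_space (x : List Char) :
    PySem.Chars.strip (' ' :: x) = PySem.Chars.strip x := by
  have h : PySem.Chars.isspace ' ' = true := by decide
  simp [PySem.Chars.strip, PySem.Chars.lstrip, List.dropWhile, h]

lemma pvJ_snoc (g : List (List Char)) (l : List Char) (h : g ≠ []) :
    pvJ (g ++ [l]) = pvJ g ++ ' ' :: l := by
  induction g with
  | nil => exact absurd rfl h
  | cons p rest ih =>
    cases rest with
    | nil => simp [pvJ, PySem.Chars.join_singleton, PySem.Chars.join_cons_cons]
    | cons q rest' =>
      have := ih (by simp)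
      simp only [List.cons_append, pvJ, PySem.Chars.join_cons_cons] at *
      simp [this]

lemma pvStrip_nil : PySem.Chars.strip ([] : List Char) = [] := rfl

lemma pvStripA_eq_scene (a2 : List Char) (g : List (List Char))
    (h : a2 = pvJ g ∨ a2 = ' ' :: pvJ g) :
    PySem.Chars.strip a2 = pvScene g := by
  rcases h with e | e
  · rw [e]; rfl
  · rw [e, pvStrip_cons_space]; rfl

lemma pvStep_inv (a : List (List Char) × List Char)
    (b : List (List (List Char)) × List (List Char)) (l : List Char)
    (h : pvInv a b) : pvInv (pvStepA a l) (pvStepG b l) := by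
  obtain ⟨h1, h2, h3⟩ := h
  have hkw : pvKwA l = pvKwB (PySem.Chars.lower l) := rfl
  by_cases hs : PySem.Chars.strip l = []
  · have eA : pvStepA a l = a := by simp [pvStepA, hs]
    have eB : pvStepG b l = b := by simp [pvStepG, hs]
    rw [eA, eB]; exact ⟨h1, h2, h3⟩
  · have hl : l ≠ [] := by intro e; exact hs (e ▸ pvStrip_nil)
    have hJl : pvJ [l] = l := PySem.Chars.join_singleton _ _
    by_cases hk : pvKwA l = true
    · by_cases ha : a.2 = []
      · have hb : b.2 = [] := h3.mp ha
        have eA : pvStepA a l = (a.1, l) := by simp [pvStepA, hs, hk, ha]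
        have eB : pvStepG b l = (b.1, [l]) := by
          simp [pvStepG, hs, hb, hkw.symm, hk]
        rw [eA, eB]
        exact ⟨h1, Or.inl hJl.symm, by simp [hl]⟩
      · have hb : b.2 ≠ [] := fun e => ha (h3.mpr e)
        have eA : pvStepA a l = (a.1 ++ [PySem.Chars.strip a.2], l) := by
          simp [pvStepA, hs, hk, ha]
        have eB : pvStepG b l = (b.1 ++ [b.2], [l]) := by
          have : b.2.isEmpty = false := by simp [hb]
          simp [pvStepG, hs, this, hkw.symm, hk]
        rw [eA, eB]
        refine ⟨?_, Or.inl hJl.symm, by simp [hl]⟩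
        simp [h1, pvStripA_eq_scene a.2 b.2 h2]
    · have hkb : pvKwB (PySem.Chars.lower l) = false := by
        rw [← hkw]; simpa using hk
      have eA : pvStepA a l = (a.1, a.2 ++ ' ' :: l) := by
        simp [pvStepA, hs, hk]
      have eB : pvStepG b l = (b.1, b.2 ++ [l]) := by
        simp [pvStepG, hs, hkb]
      rw [eA, eB]
      by_cases hb : b.2 = []
      · have ha : a.2 = [] := h3.mpr hb
        refine ⟨h1, Or.inr ?_, by simp⟩
        simp [ha, hb, hJl]
      · have hsnoc : pvJ (b.2 ++ [l]) = pvJ b.2 ++ ' ' :: l := pvJ_snoc b.2 l hb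
        refine ⟨h1, ?_, by simp⟩
        · rcases h2 with e | e
          · exact Or.inl (by rw [hsnoc, e])
          · exact Or.inr (by rw [hsnoc, e]; simp)

lemma pvFold_inv (lines : List (List Char)) (a : List (List Char) × List Char)
    (b : List (List (List Char)) × List (List Char)) (h : pvInv a b) :
    pvInv (lines.foldl pvStepA a) (lines.foldl pvStepG b) := by
  induction lines generalizing a b with
  | nil => exact h
  | cons l rest ih => exact ih _ _ (pvStep_inv a b l h)

-- A's final state, expressed through the grouping state
lemma pvFinal (sa : List (List Char) × List Char)
    (sb : List (List (List Char)) × List (List Char)) (h : pvInv sa sb) :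
    (if sa.2 ≠ [] then sa.1 ++ [PySem.Chars.strip sa.2] else sa.1) =
    (pvFinalize sb).map pvScene := by
  obtain ⟨h1, h2, h3⟩ := h
  by_cases ha : sa.2 = []
  · have hb : sb.2 = [] := h3.mp ha
    simp [ha, hb, h1, pvFinalize]
  · have hb' : sb.2 ≠ [] := fun e => ha (h3.mpr e)
    have hstr := pvStripA_eq_scene sa.2 sb.2 h2
    simp [ha, hb', h1, hstr, pvFinalize]

-- blank lines are no-ops for the grouping loop, so folding over all lines
-- equals folding over the non-blank ones
lemma pvFold_filter (lines : List (List Char))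
    (st : List (List (List Char)) × List (List Char)) :
    lines.foldl pvStepG st =
    (lines.filter (fun l => !(PySem.Chars.strip l).isEmpty)).foldl pvStepG st := by
  induction lines generalizing st with
  | nil => rfl
  | cons l rest ih =>
    by_cases hs : PySem.Chars.strip l = []
    · have e : pvStepG st l = st := by simp [pvStepG, hs]
      have hb : (PySem.Chars.strip l).isEmpty = true := by simp [hs]
      simp [List.filter, hb, e, ih]
    · have hb : (PySem.Chars.strip l).isEmpty = false := by simp [hs]
      simp [List.filter, hb, ih]

-- over non-blank lines with a non-empty current group, the grouping fold
-- computes pvChunksAux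
lemma pvFold_chunksAux (F : List (List Char))
    (hF : ∀ l ∈ F, PySem.Chars.strip l ≠ [])
    (gs : List (List (List Char))) (cur : List (List Char)) (hcur : cur ≠ []) :
    pvFinalize (F.foldl pvStepG (gs, cur)) = gs ++ pvChunksAux cur F := by
  induction F generalizing gs cur with
  | nil => simp [pvFinalize, pvChunksAux, hcur]
  | cons l rest ih =>
    have hc : cur.isEmpty = false := by simp [hcur]
    have hs : PySem.Chars.strip l ≠ [] := hF l (by simp)
    have hrest : ∀ x ∈ rest, PySem.Chars.strip x ≠ [] := fun x hx => hF x (by simp [hx])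
    by_cases hk : pvKwB (PySem.Chars.lower l) = true
    · have e : pvStepG (gs, cur) l = (gs ++ [cur], [l]) := by
        simp [pvStepG, hs, hc, hk]
      simp [List.foldl_cons, e, ih hrest _ _ (by simp : ([l] : List (List Char)) ≠ []),
        pvChunksAux, hk]
    · have e : pvStepG (gs, cur) l = (gs, cur ++ [l]) := by
        simp [pvStepG, hs, hc, hk]
      simp [List.foldl_cons, e, ih hrest _ _ (by simp : cur ++ [l] ≠ []),
        pvChunksAux, hk]

lemma pvFold_chunks (F : List (List Char))
    (hF : ∀ l ∈ F, PySem.Chars.strip l ≠ []) :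
    pvFinalize (F.foldl pvStepG ([], [])) = pvChunks F := by
  cases F with
  | nil => rfl
  | cons l rest =>
    have hs : PySem.Chars.strip l ≠ [] := hF l (by simp)
    have e : pvStepG ([], []) l = ([], [l]) := by simp [pvStepG, hs]
    simpa [List.foldl_cons, e, pvChunks] using
      pvFold_chunksAux rest (fun x hx => hF x (by simp [hx])) [] [l] (by simp)

-- pvChunksAux through the scanning helper
lemma pvChunksAux_scan (F : List (List Char)) (cur : List (List Char)) :
    pvChunksAux cur F = (cur ++ (pvScan F).1) :: pvChunks (pvScan F).2 := by
  induction F generalizing cur with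
  | nil => simp [pvChunksAux, pvScan, pvChunks]
  | cons l rest ih =>
    by_cases hk : pvKwB (PySem.Chars.lower l) = true
    · simp [pvChunksAux, pvScan, hk, pvChunks]
    · simp [pvChunksAux, pvScan, hk, ih]

-- B's recursive peeling computes take-budget of the chunk scenes
lemma pvSplitScenes_eq (n : Nat) (F : List (List Char)) :
    pvSplitScenes n F = ((pvChunks F).map pvScene).take n := by
  induction n generalizing F with
  | zero => cases F <;> simp [pvSplitScenes, pvChunks]
  | succ n ih =>
    cases F with
    | nil => simp [pvSplitScenes, pvChunks]
    | cons l tail =>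
      simp only [pvSplitScenes, pvChunks, pvChunksAux_scan tail [l], List.map_cons,
        List.take_succ_cons, ih]
      rfl

-- ===== VERDICT (by name: the statement is the Claim_ definition above) =====
theorem break_script_into_scenes_spec : Claim_equal_break_script_into_scenes := by
  intro script _
  simp only [Spec_break_script_into_scenes, break_script_into_scenes,
    break_script_into_scenes_alt]
  set lines := PySem.Chars.splitOn script.toList "\n".toList with hl
  have hinv := pvFold_inv lines ([], []) ([], [])
    ⟨rfl, Or.inl (PySem.Chars.join_nil _).symm, by simp⟩
  have hfin := pvFinal _ _ hinv
  set F := lines.filter (fun l => !(PySem.Chars.strip l).isEmpty) with hF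
  have hmem : ∀ l ∈ F, PySem.Chars.strip l ≠ [] := by
    intro l hlF
    have := List.of_mem_filter hlF
    simpa using this
  rw [hfin, pvFold_filter, ← hF, pvFold_chunks F hmem, pvSplitScenes_eq,
    PySem.List.slice_to _ _]
  · rfl
  · norm_num
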